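-- pv_equiv track=rewrite | github.com/Birkagal/AoC-2020 | src/2022/10.py | part_two
-- ===== SOURCE A (Python) =====
-- def part_two(input):
--     cycle = 1
--     register = 1
--     signal = 0
--     screen = '\n'
--     for command in input:
--         screen += '#' if register <= cycle % 40 <= register + 2 else '.'
--         cycle += 1
--         command = command.split(' ')
--         if command[0] == 'addx':
--             if cycle % 40 == 20:
--                 signal += cycle * register
--             elif cycle % 40 == 1:
--                 screen += '\n'
--
--             screen += '#' if register <= cycle % 40 <= register + 2 else '.'
--             cycle += 1
--             register += int(command[1])
--
--         if cycle % 40 == 20: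
--             signal += cycle * register
--         if cycle % 40 == 1:
--             screen += '\n'
--     return screen
-- ===== SOURCE B (Python) =====
-- def part_two(input):
--     # Pass 1: register value for every cycle (two cycles per addx, one otherwise).
--     regs = []
--     register = 1
--     for command in input:
--         parts = command.split(' ')
--         regs.append(register)
--         if parts[0] == 'addx':
--             regs.append(register)
--             register += int(parts[1])
--     # Pass 2: render the screen, one pixel per cycle, newline after every 40th.
--     screen = '\n'
--     for i, r in enumerate(regs, 1):
--         screen += '#' if r <= i % 40 <= r + 2 else '.'
--         if i % 40 == 0:
--             screen += '\n'
--     return screen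
-- ===== Notes on version B (the rewrite author's own statement) =====
-- stated objective: simpler
-- what changed: Replaces A's single interleaved loop (cycle counter, register, unused signal accumulator and screen all updated in one body with a duplicated pixel/newline block inside the addx branch) by two plain passes: first build the per-cycle register list, then render one pixel per cycle with a newline after every 40th; the unused 'signal' is not computed at all.
import Mathlib
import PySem

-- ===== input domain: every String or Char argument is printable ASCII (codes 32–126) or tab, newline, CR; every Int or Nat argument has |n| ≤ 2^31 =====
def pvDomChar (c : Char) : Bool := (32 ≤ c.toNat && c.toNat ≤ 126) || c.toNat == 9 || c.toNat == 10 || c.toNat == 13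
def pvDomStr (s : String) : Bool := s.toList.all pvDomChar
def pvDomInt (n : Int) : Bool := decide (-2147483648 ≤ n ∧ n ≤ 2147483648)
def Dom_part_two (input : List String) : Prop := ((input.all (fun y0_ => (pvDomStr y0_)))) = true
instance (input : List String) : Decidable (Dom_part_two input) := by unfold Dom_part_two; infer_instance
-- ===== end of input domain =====

-- B renders in two passes (per-cycle register list, then one rendering loop, no unused `signal`)
-- instead of A's single interleaved loop; objective: simpler, same cost.


-- ===== PORT A =====
-- loop body of A; state = (cycle, register, signal, screen)
def part_two_step (st : Int × Int × Int × String) (command : String) : Int × Int × Int × String :=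
  let cycle := st.1
  let register := st.2.1
  let signal := st.2.2.1
  let screen := st.2.2.2
  let screen := screen ++ (if register ≤ PySem.Int.mod cycle 40 ∧ PySem.Int.mod cycle 40 ≤ register + 2 then "#" else ".")
  let cycle := cycle + 1
  let cmd := (PySem.Str.split? command " ").getD []
  let st2 :=
    if cmd.headD "" = "addx" then
      let signal := if PySem.Int.mod cycle 40 = 20 then signal + cycle * register else signal
      let screen := if PySem.Int.mod cycle 40 = 20 then screen
                    else if PySem.Int.mod cycle 40 = 1 then screen ++ "\n" else screen
      let screen := screen ++ (if register ≤ PySem.Int.mod cycle 40 ∧ PySem.Int.mod cycle 40 ≤ register + 2 then "#" else ".")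
      let cycle := cycle + 1
      -- int(command[1]): Pre_ excludes inputs where this raises (IndexError/ValueError)
      let register := register + (PySem.Int.ofStr? ((PySem.List.pyGet? cmd 1).getD "")).getD 0
      (cycle, register, signal, screen)
    else (cycle, register, signal, screen)
  let cycle := st2.1
  let register := st2.2.1
  let signal := st2.2.2.1
  let screen := st2.2.2.2
  let signal := if PySem.Int.mod cycle 40 = 20 then signal + cycle * register else signal
  let screen := if PySem.Int.mod cycle 40 = 1 then screen ++ "\n" else screen
  (cycle, register, signal, screen)

def part_two (input : List String) : String :=
  (input.foldl part_two_step (1, 1, 0, "\n")).2.2.2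

-- ===== PORT B =====
-- pass 1 of B: the register value at each cycle
def part_two_regs (register : Int) : List String → List Int
  | [] => []
  | command :: rest =>
    let parts := (PySem.Str.split? command " ").getD []
    if parts.headD "" = "addx" then
      register :: register ::
        part_two_regs (register + (PySem.Int.ofStr? ((PySem.List.pyGet? parts 1).getD "")).getD 0) rest
    else register :: part_two_regs register rest

-- pass 2 of B: one pixel per cycle (i is the 1-based cycle index), newline after every 40th
def part_two_render (i : Int) : List Int → String
  | [] => ""
  | r :: rs =>
    (if r ≤ PySem.Int.mod i 40 ∧ PySem.Int.mod i 40 ≤ r + 2 then "#" else ".") ++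
    (if PySem.Int.mod i 40 = 0 then "\n" else "") ++
    part_two_render (i + 1) rs

def part_two_alt (input : List String) : String :=
  "\n" ++ part_two_render 1 (part_two_regs 1 input)

-- ===== PRECONDITION & SPEC =====
-- Pre_ excludes exactly the inputs where A raises: an 'addx' command whose second
-- space-separated token is missing (IndexError) or not int()-parsable (ValueError).
def Pre_part_two (input : List String) : Prop :=
  ∀ s ∈ input, ((PySem.Str.split? s " ").getD []).headD "" = "addx" →
    (PySem.Int.ofStr? ((PySem.List.pyGet? ((PySem.Str.split? s " ").getD []) 1).getD "")).isSome = true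
instance (input : List String) : Decidable (Pre_part_two input) := by unfold Pre_part_two; infer_instance

def pvWitness_part_two : List String := ["noop", "addx 3", "addx -5"]

def Spec_part_two (input : List String) (out : String) : Prop := out = part_two_alt input
instance (input : List String) (out : String) : Decidable (Spec_part_two input out) := by unfold Spec_part_two; infer_instance

-- ===== CLAIM (what is proved, stated in full; the proofs are below) =====
def Claim_equal_part_two : Prop := ∀ (input : List String), Dom_part_two input → Pre_part_two input → Spec_part_two input (part_two input)

-- ===== LEMMAS AND PROOFS =====

-- 1-based cycle count: the 'cycle just became ≡ 1 (mod 40)' test after a pixel is the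
-- 'pixel index ≡ 0 (mod 40)' test before incrementing.
lemma part_two_mod_shift (c : Int) : (PySem.Int.mod (c + 1) 40 = 1) ↔ (PySem.Int.mod c 40 = 0) := by
  rw [PySem.Int.mod_eq_emod_of_pos (by omega : (0:Int) < 40),
      PySem.Int.mod_eq_emod_of_pos (by omega : (0:Int) < 40)]
  omega

lemma part_two_ite_append (q : Prop) [Decidable q] (s t : String) :
    (if q then s ++ t else s) = s ++ (if q then t else "") := by
  split_ifs <;> simp

-- the 20/elif-1 chain on the screen is just 'newline iff previous cycle count ≡ 0 (mod 40)'
lemma part_two_ite20 (c : Int) (s : String) :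
    (if PySem.Int.mod (c + 1) 40 = 20 then s
     else if PySem.Int.mod (c + 1) 40 = 1 then s ++ "\n" else s)
    = s ++ (if PySem.Int.mod c 40 = 0 then "\n" else "") := by
  by_cases h : PySem.Int.mod c 40 = 0
  · have h1 : PySem.Int.mod (c + 1) 40 = 1 := (part_two_mod_shift c).mpr h
    have h20 : ¬ PySem.Int.mod (c + 1) 40 = 20 := by rw [h1]; decide
    rw [if_neg h20, if_pos h1, if_pos h]
  · have h1 : ¬ PySem.Int.mod (c + 1) 40 = 1 := fun hh => h ((part_two_mod_shift c).mp hh)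
    rw [if_neg h]
    by_cases h20 : PySem.Int.mod (c + 1) 40 = 20
    · rw [if_pos h20, String.append_empty]
    · rw [if_neg h20, if_neg h1, String.append_empty]

lemma part_two_loop_eq (cmds : List String) :
    ∀ (c r sig : Int) (scr : String),
      (cmds.foldl part_two_step (c, r, sig, scr)).2.2.2 = scr ++ part_two_render c (part_two_regs r cmds) := by
  induction cmds with
  | nil => intro c r sig scr; simp [part_two_render, part_two_regs]
  | cons cmd rest ih =>
    intro c r sig scr
    simp only [List.foldl_cons, part_two_step, part_two_regs]
    by_cases ha : ((PySem.Str.split? cmd " ").getD []).headD "" = "addx"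
    · rw [if_pos ha, if_pos ha]
      simp only []
      rw [ih]
      rw [part_two_ite_append, part_two_ite20]
      simp only [part_two_mod_shift, part_two_render]
      simp [String.append_assoc]
    · rw [if_neg ha, if_neg ha]
      simp only []
      rw [ih]
      rw [part_two_ite_append]
      simp only [part_two_mod_shift, part_two_render]
      simp [String.append_assoc]

-- ===== VERDICT (by name: the statement is the Claim_ definition above) =====
theorem part_two_spec : Claim_equal_part_two := by
  intro input _ _
  unfold Spec_part_two part_two part_two_alt
  exact part_two_loop_eq input 1 1 0 "\n"
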